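-- pv_equiv track=rewrite | github.com/alexbaucom17/AdventOfCode | 2025/day6.py | find_column_breaks
-- ===== SOURCE A (Python) =====
-- def find_column_breaks(data_rows: list[str]) -> set[int]:
--   col_gaps = set()
--   for j,row in enumerate(data_rows):
--     s = set()
--     for i,c in enumerate(row):
--       if c == ' ':
--         s.add(i)
--     if j == 0:
--       col_gaps = s
--     else:
--       col_gaps &= s
--   return col_gaps
-- ===== SOURCE B (Python) =====
-- def find_column_breaks(data_rows: list[str]) -> set[int]:
--   if not data_rows:
--     return set()
--   return {i for i in range(len(data_rows[0]))
--           if all(i < len(row) and row[i] == ' ' for row in data_rows)}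
-- ===== Notes on version B (the rewrite author's own statement) =====
-- stated objective: simpler
-- what changed: Replaces the per-row space-index sets and repeated set intersections with a single column-wise scan: for each column of the first row, a short-circuiting all() checks that every row has a space there.
import Mathlib
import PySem

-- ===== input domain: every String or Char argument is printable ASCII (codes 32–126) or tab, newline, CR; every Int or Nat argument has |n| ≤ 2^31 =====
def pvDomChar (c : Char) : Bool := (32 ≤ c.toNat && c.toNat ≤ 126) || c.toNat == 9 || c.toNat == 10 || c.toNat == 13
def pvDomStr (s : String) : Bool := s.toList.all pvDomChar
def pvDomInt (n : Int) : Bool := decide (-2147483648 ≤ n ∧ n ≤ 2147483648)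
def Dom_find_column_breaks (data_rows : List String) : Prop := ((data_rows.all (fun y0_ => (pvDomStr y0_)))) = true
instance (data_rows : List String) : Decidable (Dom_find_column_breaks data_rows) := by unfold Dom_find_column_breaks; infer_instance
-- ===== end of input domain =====

-- B replaces A's per-row space-index sets and repeated intersections by one
-- column-wise scan over the first row's columns (objective: simpler).

-- ===== PORT A =====
-- inner loop of A: the set s of indices i of row with row[i] == ' '
def pvSpaces (row : String) : PySem.Set Int :=
  (PySem.List.enumerate row.toList 0).foldl
    (fun s p => if p.2 == ' ' then PySem.Set.add s p.1 else s) PySem.Set.empty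

def find_column_breaks (data_rows : List String) : List Int :=
  (PySem.List.enumerate data_rows 0).foldl
    (fun col_gaps p =>
      if p.1 == 0 then pvSpaces p.2 else PySem.Set.inter col_gaps (pvSpaces p.2))
    PySem.Set.empty

-- ===== PORT B =====
def find_column_breaks_alt (data_rows : List String) : List Int :=
  match data_rows with
  | [] => []
  | r0 :: _ =>
    (PySem.List.pyRange 0 (PySem.Str.len r0) 1).filter
      (fun i => data_rows.all
        (fun row => decide (i < PySem.Str.len row) && (PySem.Str.pyGet? row i == some ' ')))

-- ===== PRECONDITION & SPEC =====
def Spec_find_column_breaks (data_rows : List String) (out : List Int) : Prop := out = find_column_breaks_alt data_rows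
instance (data_rows : List String) (out : List Int) : Decidable (Spec_find_column_breaks data_rows out) := by unfold Spec_find_column_breaks; infer_instance

-- ===== CLAIM (what is proved, stated in full; the proofs are below) =====
def Claim_equal_find_column_breaks : Prop := ∀ (data_rows : List String), Dom_find_column_breaks data_rows → Spec_find_column_breaks data_rows (find_column_breaks data_rows)

-- ===== LEMMAS AND PROOFS =====

-- pyGet? on a cons at a shifted nonnegative index
theorem pvGet_cons_succ (c : Char) (cs : List Char) (m : Int) (h : 0 ≤ m) :
    PySem.Chars.pyGet? (c :: cs) (m + 1) = PySem.Chars.pyGet? cs m := by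
  rw [PySem.Chars.pyGet?, PySem.Chars.pyGet?,
      show (m + 1 : Int) = ((m.toNat + 1 : Nat) : Int) by omega,
      show m = ((m.toNat : Nat) : Int) by omega,
      PySem.List.pyGet?_natCast, PySem.List.pyGet?_natCast]
  simp only [List.getElem?_cons_succ, Int.toNat_natCast]

-- out-of-range from the right gives none
theorem pvGet_none_of_ge (row : String) (i : Int) (h : PySem.Str.len row ≤ i) :
    PySem.Str.pyGet? row i = none := by
  rw [PySem.Str.pyGet?, PySem.Chars.pyGet?, PySem.List.pyGet?_eq_none_iff, PySem.Raise.InRange]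
  rw [PySem.Str.len] at h
  omega

-- inner loop, generalized: with all of s below the start index k, every add appends
theorem pvSpaces_go (cs : List Char) (k : Int) (s : List Int) (hs : ∀ x ∈ s, x < k) :
    (PySem.List.enumerate cs k).foldl
      (fun s p => if p.2 == ' ' then PySem.Set.add s p.1 else s) s
    = s ++ (PySem.List.pyRange k (k + cs.length) 1).filter
        (fun i => PySem.Chars.pyGet? cs (i - k) == some ' ') := by
  induction cs generalizing k s with
  | nil => simp [PySem.List.enumerate_nil, PySem.List.pyRange_one_eq_nil]
  | cons c cs ih =>
    rw [PySem.List.enumerate_cons, List.foldl_cons]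
    have hr : PySem.List.pyRange k (k + (c :: cs).length) 1
        = k :: PySem.List.pyRange (k + 1) (k + (c :: cs).length) 1 := by
      apply PySem.List.pyRange_one_cons
      simp
    have hb : (k + ((c :: cs).length : Int)) = (k + 1) + cs.length := by
      simp only [List.length_cons]
      push_cast
      ring
    have hfilter :
        (PySem.List.pyRange (k + 1) ((k + 1) + cs.length) 1).filter
          (fun i => PySem.Chars.pyGet? (c :: cs) (i - k) == some ' ')
        = (PySem.List.pyRange (k + 1) ((k + 1) + cs.length) 1).filter
          (fun i => PySem.Chars.pyGet? cs (i - (k + 1)) == some ' ') := by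
      apply List.filter_congr
      intro i hi
      rw [PySem.List.mem_pyRange_one] at hi
      rw [show (i - k : Int) = (i - (k + 1)) + 1 by ring,
          pvGet_cons_succ c cs _ (by omega)]
    by_cases hc : c = ' '
    · subst hc
      simp only [beq_self_eq_true, if_pos]
      have hadd : PySem.Set.add s k = s ++ [k] := by
        apply PySem.Set.add_of_not_mem
        intro h
        exact absurd (hs k h) (by omega)
      have hs' : ∀ x ∈ s ++ [k], x < k + 1 := by
        intro x hx
        rcases List.mem_append.1 hx with h | h
        · exact lt_trans (hs x h) (by omega)
        · simp at h; omega
      rw [hadd, ih (k + 1) (s ++ [k]) hs', hr, List.filter_cons, hb, hfilter]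
      simp
    · have hcb : (c == ' ') = false := by simp [hc]
      rw [hcb]
      simp only [Bool.false_eq_true, if_neg, not_false_iff]
      have hs' : ∀ x ∈ s, x < k + 1 := fun x hx => lt_trans (hs x hx) (by omega)
      rw [ih (k + 1) s hs', hr, List.filter_cons, hb, hfilter]
      simp [hc]

theorem pvSpaces_eq (row : String) :
    pvSpaces row = (PySem.List.pyRange 0 (PySem.Str.len row) 1).filter
      (fun i => PySem.Str.pyGet? row i == some ' ') := by
  have := pvSpaces_go row.toList 0 [] (by simp)
  simpa [pvSpaces, PySem.Set.empty, PySem.Str.len, PySem.Str.pyGet?] using this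

theorem pvSpaces_mem (row : String) (i : Int) :
    i ∈ pvSpaces row ↔ (0 ≤ i ∧ PySem.Str.pyGet? row i = some ' ') := by
  rw [pvSpaces_eq]
  simp only [List.mem_filter, PySem.List.mem_pyRange_one, beq_iff_eq]
  constructor
  · rintro ⟨⟨h0, _⟩, h⟩; exact ⟨h0, h⟩
  · rintro ⟨h0, h⟩
    refine ⟨⟨h0, ?_⟩, h⟩
    by_contra hlt
    rw [not_lt] at hlt
    rw [pvGet_none_of_ge row i hlt] at h
    simp at h

-- the outer fold over the tail is iterated filtering
theorem pvFold_inter (rest : List String) (s : List Int) :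
    rest.foldl (fun g r => PySem.Set.inter g (pvSpaces r)) s
    = s.filter (fun i => rest.all (fun r => (pvSpaces r).contains i)) := by
  induction rest generalizing s with
  | nil => simp
  | cons r rest ih =>
    rw [List.foldl_cons, ih, PySem.Set.inter, List.filter_filter]
    apply List.filter_congr
    intro i _
    simp [Bool.and_comm]

-- ===== VERDICT (by name: the statement is the Claim_ definition above) =====
theorem find_column_breaks_spec : Claim_equal_find_column_breaks := by
  intro data_rows _
  unfold Spec_find_column_breaks
  cases data_rows with
  | nil =>
    simp [find_column_breaks, find_column_breaks_alt, PySem.List.enumerate_nil,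
          PySem.Set.empty]
  | cons r0 rest =>
    unfold find_column_breaks find_column_breaks_alt
    rw [PySem.List.enumerate_cons, List.foldl_cons]
    simp only [beq_self_eq_true, if_pos, zero_add]
    have h1 : (PySem.List.enumerate rest 1).foldl
        (fun col_gaps p =>
          if p.1 == 0 then pvSpaces p.2 else PySem.Set.inter col_gaps (pvSpaces p.2))
        (pvSpaces r0)
        = (PySem.List.enumerate rest 1).foldl
        (fun col_gaps p => PySem.Set.inter col_gaps (pvSpaces p.2)) (pvSpaces r0) := by
      apply PySem.List.foldl_congr_mem
      intro acc p hp
      rw [PySem.List.mem_enumerate_iff] at hp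
      obtain ⟨kk, hk, rfl⟩ := hp
      have hne : ((1 + (kk : Int)) == 0) = false := by simp; omega
      rw [hne]; simp
    have h2 : (PySem.List.enumerate rest 1).foldl
        (fun col_gaps p => PySem.Set.inter col_gaps (pvSpaces p.2)) (pvSpaces r0)
        = rest.foldl (fun g r => PySem.Set.inter g (pvSpaces r)) (pvSpaces r0) := by
      conv_rhs => rw [← PySem.List.map_snd_enumerate rest 1]
      rw [List.foldl_map]
    rw [h1, h2, pvFold_inter, pvSpaces_eq, List.filter_filter]
    apply List.filter_congr
    intro i hi
    rw [PySem.List.mem_pyRange_one] at hi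
    rcases hi with ⟨h0, hn⟩
    have hpt : ∀ r : String, ((pvSpaces r).contains i)
        = (decide (i < PySem.Str.len r) && (PySem.Str.pyGet? r i == some ' ')) := by
      intro r
      by_cases hg : PySem.Str.pyGet? r i = some ' '
      · have hlt : i < PySem.Str.len r := by
          by_contra hlt
          rw [not_lt] at hlt
          rw [pvGet_none_of_ge r i hlt] at hg
          simp at hg
        have hm : i ∈ pvSpaces r := (pvSpaces_mem r i).2 ⟨h0, hg⟩
        simp [hm]
        exact ⟨by simpa [PySem.Str.len] using hlt, hg⟩
      · have hm : i ∉ pvSpaces r := fun h => hg ((pvSpaces_mem r i).1 h).2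
        simp [hm]
        exact fun _ h => hg h
    have hr0 : (decide (i < PySem.Str.len r0) && (PySem.Str.pyGet? r0 i == some ' '))
        = (PySem.Str.pyGet? r0 i == some ' ') := by
      simp
      intro _
      rw [PySem.Str.len] at hn
      simpa using hn
    simp only [List.all_cons, hpt, hr0]
    rw [Bool.and_comm]
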